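-- pv_equiv track=rewrite | github.com/aws-samples/generative-ai-cdk-constructs-samples | samples/code-expert/packages/code-expert/code-expert/amzn_code_expert_code_expert/EvaluateRules/rule_evaluator.py | clean_json_text
-- ===== SOURCE A (Python) =====
-- def clean_json_text(text: str) -> str:
--     """
--     Clean the JSON text by removing non-printable characters and escaping them.
--
--     Args:
--         text (str): The JSON text to clean.
--
--     Returns:
--         str: The cleaned JSON text.
--     """
--     cleaned_text = []
--     in_quotes = False
--     escape_chars = {"\n": "\\n", "\r": "\\r", "\t": "\\t"}
--
--     for c in text:
--         if c.isprintable():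
--             cleaned_text.append(c)
--             if c == '"':
--                 in_quotes = not in_quotes
--         elif in_quotes and c in escape_chars:
--             cleaned_text.append(escape_chars[c])
--
--     return "".join(cleaned_text)
-- ===== SOURCE B (Python) =====
-- def clean_json_text(text: str) -> str:
--     """Clean JSON text: split on '"' so segment-index parity replaces the
--     running in_quotes toggle, then filter/escape each segment and rejoin."""
--     escape_chars = {"\n": "\\n", "\r": "\\r", "\t": "\\t"}
--     segments = text.split('"')
--     processed = []
--     for i, seg in enumerate(segments):
--         if i % 2 == 1:
--             processed.append(
--                 "".join(
--                     escape_chars[c] if c in escape_chars else c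
--                     for c in seg
--                     if c.isprintable() or c in escape_chars
--                 )
--             )
--         else:
--             processed.append("".join(c for c in seg if c.isprintable()))
--     return '"'.join(processed)
-- ===== Notes on version B (the rewrite author's own statement) =====
-- stated objective: alternative
-- what changed: Replaced the single character loop with a running in_quotes toggle by splitting the text on the double-quote character and using segment-index parity to decide quote context, filtering/escaping each segment and rejoining.
import Mathlib
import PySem

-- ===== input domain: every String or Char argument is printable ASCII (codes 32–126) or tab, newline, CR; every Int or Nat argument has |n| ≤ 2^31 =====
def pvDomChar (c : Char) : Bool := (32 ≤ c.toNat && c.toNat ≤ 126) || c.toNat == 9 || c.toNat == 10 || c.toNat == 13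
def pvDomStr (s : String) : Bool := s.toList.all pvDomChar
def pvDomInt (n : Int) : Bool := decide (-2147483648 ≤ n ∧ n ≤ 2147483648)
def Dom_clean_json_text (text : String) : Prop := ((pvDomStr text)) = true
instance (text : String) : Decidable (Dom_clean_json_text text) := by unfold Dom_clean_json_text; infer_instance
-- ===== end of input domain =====

-- B replaces A's running in_quotes toggle by splitting on '"' and using segment-index parity (alternative decomposition, same cost).

-- shared escape table (the Python dict {'\n': '\\n', '\r': '\\r', '\t': '\\t'} of both programs)
def pvEsc? (c : Char) : Option (List Char) :=
  if c = '\n' then some ['\\', 'n']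
  else if c = '\r' then some ['\\', 'r']
  else if c = '\t' then some ['\\', 't']
  else none

-- str.isprintable; exact on Dom (codes 32–126 are printable, 9/10/13 are not)
def pvPrintable (c : Char) : Bool := 32 ≤ c.toNat && c.toNat ≤ 126

-- ===== PORT A =====
def clean_json_text (text : String) : String :=
  let st := text.toList.foldl (fun (st : List Char × Bool) c =>
    if pvPrintable c then
      (st.1 ++ [c], if c == '"' then !st.2 else st.2)
    else if st.2 && (pvEsc? c).isSome then
      (st.1 ++ (pvEsc? c).getD [], st.2)
    else st) ([], false)
  String.ofList st.1

-- ===== PORT B =====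
-- even-index segment (outside quotes): keep printable characters
def pvSegEven (seg : List Char) : List Char := seg.filter pvPrintable

-- odd-index segment (inside quotes): keep printables, escape \n \r \t
def pvSegOdd (seg : List Char) : List Char :=
  seg.flatMap (fun c =>
    if pvPrintable c || (pvEsc? c).isSome then (pvEsc? c).getD [c] else [])

def clean_json_text_alt (text : String) : String :=
  let segments := PySem.Chars.splitOn text.toList ['"']
  let processed := (PySem.List.enumerate segments).map
    (fun p => if p.1 % 2 == 1 then pvSegOdd p.2 else pvSegEven p.2)
  String.ofList (PySem.Chars.join ['"'] processed)

-- ===== PRECONDITION & SPEC =====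
def Spec_clean_json_text (text : String) (out : String) : Prop := out = clean_json_text_alt text
instance (text : String) (out : String) : Decidable (Spec_clean_json_text text out) := by unfold Spec_clean_json_text; infer_instance

-- ===== CLAIM (what is proved, stated in full; the proofs are below) =====
def Claim_equal_clean_json_text : Prop := ∀ (text : String), Dom_clean_json_text text → Spec_clean_json_text text (clean_json_text text)

-- ===== LEMMAS AND PROOFS =====

-- structural version of split('"')
def pvSplit : List Char → List (List Char)
  | [] => [[]]
  | c :: cs => if c = '"' then [] :: pvSplit cs else (pvSplit cs).modifyHead (c :: ·)

theorem pvSplit_ne_nil (cs : List Char) : pvSplit cs ≠ [] := by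
  induction cs with
  | nil => simp [pvSplit]
  | cons c cs ih =>
    simp only [pvSplit]
    split_ifs
    · simp
    · cases h : pvSplit cs with
      | nil => exact absurd h ih
      | cons s rest => simp

theorem pvSplitOn_go_eq (fuel : Nat) (l cur : List Char) (acc : List (List Char))
    (hl : l.length < fuel) :
    PySem.Chars.splitOn.go ['"'] fuel l cur acc
      = acc.reverse ++ (pvSplit l).modifyHead (cur.reverse ++ ·) := by
  induction fuel generalizing l cur acc with
  | zero => omega
  | succ fuel ih =>
    cases l with
    | nil =>
      simp [PySem.Chars.splitOn.go, pvSplit]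
    | cons c rest =>
      simp only [PySem.Chars.splitOn.go]
      by_cases hc : c = '"'
      · subst hc
        rw [if_pos (by simp [List.isPrefixOf])]
        have hr := ih rest [] (cur.reverse :: acc) (by simpa using Nat.lt_of_succ_lt_succ hl)
        simp only [List.length_cons, List.length_nil, List.drop_succ_cons, List.drop_zero]
        rw [hr]
        cases h : pvSplit rest with
        | nil => exact absurd h (pvSplit_ne_nil rest)
        | cons s rs => simp [pvSplit, h]
      · rw [if_neg (by simp [List.isPrefixOf]; intro h; exact absurd h.symm hc)]
        rw [ih rest (c :: cur) acc (by simpa using Nat.lt_of_succ_lt_succ hl)]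
        cases h : pvSplit rest with
        | nil => exact absurd h (pvSplit_ne_nil rest)
        | cons s rs => simp [pvSplit, hc, h]

theorem pvSplitOn_quote (cs : List Char) :
    PySem.Chars.splitOn cs ['"'] = pvSplit cs := by
  unfold PySem.Chars.splitOn
  rw [pvSplitOn_go_eq (cs.length + 1) cs [] [] (Nat.lt_succ_self _)]
  cases h : pvSplit cs with
  | nil => exact absurd h (pvSplit_ne_nil cs)
  | cons s rest => simp

-- direct recursion computing A's loop output
def pvGo : Bool → List Char → List Char
  | _, [] => []
  | b, c :: cs =>
    if pvPrintable c then c :: pvGo (if c == '"' then !b else b) cs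
    else if b && (pvEsc? c).isSome then (pvEsc? c).getD [] ++ pvGo b cs
    else pvGo b cs

theorem pvFoldA (cs : List Char) (acc : List Char) (b : Bool) :
    (cs.foldl (fun (st : List Char × Bool) c =>
      if pvPrintable c then
        (st.1 ++ [c], if c == '"' then !st.2 else st.2)
      else if st.2 && (pvEsc? c).isSome then
        (st.1 ++ (pvEsc? c).getD [], st.2)
      else st) (acc, b)).1 = acc ++ pvGo b cs := by
  induction cs generalizing acc b with
  | nil => simp [pvGo]
  | cons c cs ih =>
    simp only [List.foldl_cons, pvGo]
    by_cases hp : pvPrintable c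
    · simp only [if_pos hp, ih]; simp
    · simp only [if_neg hp]
      by_cases hb : b = true ∧ (pvEsc? c).isSome = true
      · rw [if_pos (by simp [hb.1, hb.2]), if_pos (by simp [hb.1, hb.2])]
        rw [hb.1, ih]; simp
      · rw [if_neg (by simp_all), if_neg (by simp_all)]
        exact ih acc b

def pvProc (b : Bool) (seg : List Char) : List Char :=
  if b then pvSegOdd seg else pvSegEven seg

-- the processed segments joined with '"', with alternating parity
def pvRender : Bool → List (List Char) → List Char
  | _, [] => []
  | b, [s] => pvProc b s
  | b, s :: s' :: rest => pvProc b s ++ '"' :: pvRender (!b) (s' :: rest)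

theorem pvEsc?_of_printable {c : Char} (h : pvPrintable c = true) : pvEsc? c = none := by
  unfold pvEsc?
  split_ifs with h1 h2 h3 <;> first
  | rfl
  | (subst_vars; simp [pvPrintable] at h)

theorem pvProc_cons_printable (b : Bool) (c : Char) (s : List Char)
    (hp : pvPrintable c = true) : pvProc b (c :: s) = c :: pvProc b s := by
  cases b <;> simp [pvProc, pvSegEven, pvSegOdd, hp, pvEsc?_of_printable hp]

theorem pvGo_eq_render (cs : List Char) (b : Bool) :
    pvGo b cs = pvRender b (pvSplit cs) := by
  induction cs generalizing b with
  | nil => simp [pvGo, pvSplit, pvRender, pvProc, pvSegEven, pvSegOdd]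
  | cons c cs ih =>
    by_cases hq : c = '"'
    · subst hq
      have hgo : pvGo b ('"' :: cs) = '"' :: pvGo (!b) cs := by
        simp [pvGo, pvPrintable]
      rw [hgo, ih (!b)]
      cases hs : pvSplit cs with
      | nil => exact absurd hs (pvSplit_ne_nil cs)
      | cons s rest =>
        cases b <;> simp [pvSplit, hs, pvRender, pvProc, pvSegOdd, pvSegEven]
    · cases h : pvSplit cs with
      | nil => exact absurd h (pvSplit_ne_nil cs)
      | cons s rest =>
        have hsplit : pvSplit (c :: cs) = (c :: s) :: rest := by
          simp [pvSplit, hq, h]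
        rw [hsplit]
        by_cases hp : pvPrintable c
        · have hgo : pvGo b (c :: cs) = c :: pvGo b cs := by
            simp [pvGo, hp, hq]
          rw [hgo, ih b, h]
          cases rest with
          | nil => simp [pvRender, pvProc_cons_printable b c s hp]
          | cons s' rs => simp [pvRender, pvProc_cons_printable b c s hp]
        · have hgo : pvGo b (c :: cs)
              = (if b && (pvEsc? c).isSome then (pvEsc? c).getD [] else []) ++ pvGo b cs := by
            simp only [pvGo, if_neg hp]
            by_cases hbe : b && (pvEsc? c).isSome <;> simp [hbe]
          have hproc : pvProc b (c :: s)
              = (if b && (pvEsc? c).isSome then (pvEsc? c).getD [] else []) ++ pvProc b s := by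
            cases b with
            | false => simp [pvProc, pvSegEven, hp]
            | true =>
              simp only [pvProc, pvSegOdd, List.flatMap_cons, Bool.true_and, if_true]
              cases he : pvEsc? c with
              | none => simp [hp]
              | some e => simp [hp]
          rw [hgo, ih b, h]
          cases rest with
          | nil => simp [pvRender, hproc]
          | cons s' rs => simp [pvRender, hproc]

theorem pvParity_succ (k : Int) : ((k + 1) % 2 == 1) = !(k % 2 == 1) := by
  rcases Int.emod_two_eq k with h | h <;> simp [Int.add_emod, h]

theorem pvJoin_enumerate (segs : List (List Char)) (k : Int) :
    PySem.Chars.join ['"'] ((PySem.List.enumerate segs k).map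
      (fun p => if p.1 % 2 == 1 then pvSegOdd p.2 else pvSegEven p.2))
      = pvRender (k % 2 == 1) segs := by
  induction segs generalizing k with
  | nil => simp [pvRender, PySem.Chars.join_nil]
  | cons s rest ih =>
    cases rest with
    | nil =>
      simp only [PySem.List.enumerate_cons, PySem.List.enumerate_nil, List.map_cons,
        List.map_nil, PySem.Chars.join_singleton, pvRender, pvProc]
    | cons s' rs =>
      have h2 := ih (k + 1)
      rw [pvParity_succ k] at h2
      simp only [PySem.List.enumerate_cons, List.map_cons] at h2 ⊢
      rw [PySem.Chars.join_cons_cons, h2]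
      cases hb : (k % 2 == 1) <;> simp [pvRender, pvProc]

-- ===== VERDICT (by name: the statement is the Claim_ definition above) =====
theorem clean_json_text_spec : Claim_equal_clean_json_text := by
  intro text _
  unfold Spec_clean_json_text clean_json_text clean_json_text_alt
  simp only
  have h0 : (((0 : Int)) % 2 == 1) = false := by decide
  rw [pvFoldA text.toList [] false, List.nil_append, pvSplitOn_quote,
    pvJoin_enumerate, h0, pvGo_eq_render]
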